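-- pv_equiv track=rewrite | github.com/MrBrantCode/unitest_baseline | mut_generate/mist_train_taco/taco_10117/solution.py | possible_final_creature_colors
-- ===== SOURCE A (Python) =====
-- def possible_final_creature_colors(N, A):
--     A.sort()
--     sumA = sum(A) - A[-1]
--     memo = 0
--     for i in range(N - 1, -1, -1):
--         if sumA * 2 < A[i] or i == 0:
--             memo = i
--             break
--         sumA -= A[i - 1]
--     return N - memo
-- ===== SOURCE B (Python) =====
-- def possible_final_creature_colors(N, A):
--     # Declarative version: after sorting, creature i is "heavy" if it outweighs
--     # twice its merging pool -- everything except the top creature and the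
--     # still-unmerged block A[i:N-1] between it and the top.  Only creatures
--     # from the last heavy index onward can yield the final color.
--     A.sort()
--     heavy = [i for i in range(1, N)
--              if 2 * (sum(A) - A[-1] - sum(A[i:N-1])) < A[i]]
--     return N - (heavy[-1] if heavy else 0)
-- ===== Notes on version B (the rewrite author's own statement) =====
-- stated objective: alternative
-- what changed: Replaces A's backward incremental scan (running sum updated by subtraction, early break, loop-carried memo) with a declarative brute-force pass: for each candidate index recompute its merging pool from scratch with slice sums, collect the heavy indices in a list and count from the last one; Pre_ excludes only the inputs where A raises IndexError (empty A, and N > len(A)).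
import Mathlib
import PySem

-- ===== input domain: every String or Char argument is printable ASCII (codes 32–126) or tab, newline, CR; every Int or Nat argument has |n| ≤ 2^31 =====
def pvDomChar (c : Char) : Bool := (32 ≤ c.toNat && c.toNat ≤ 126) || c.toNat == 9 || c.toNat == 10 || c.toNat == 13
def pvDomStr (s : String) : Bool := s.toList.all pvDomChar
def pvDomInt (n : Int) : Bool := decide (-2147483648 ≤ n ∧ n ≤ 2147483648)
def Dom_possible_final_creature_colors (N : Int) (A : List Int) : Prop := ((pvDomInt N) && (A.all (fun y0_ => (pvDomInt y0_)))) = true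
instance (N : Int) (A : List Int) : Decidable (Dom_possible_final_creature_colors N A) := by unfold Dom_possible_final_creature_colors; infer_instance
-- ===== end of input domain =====

-- B replaces A's backward incremental subtractive scan with early break by a
-- declarative pass recomputing each candidate's pool via slice sums
-- ("alternative" objective; return-value equivalence only: both Pythons sort
-- A in place).

-- ===== PORT A =====
-- the backward loop with early break: returns the final value of memo
def pvLoopA (As : List Int) : List Int → Int → Int
  | [], _ => 0
  | i :: rest, sumA =>
    if sumA * 2 < PySem.List.pyGetD As i 0 ∨ i = 0 then i
    else pvLoopA As rest (sumA - PySem.List.pyGetD As (i - 1) 0)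

def possible_final_creature_colors (N : Int) (A : List Int) : Int :=
  let As := PySem.List.sorted A (fun x => x) false
  let sumA := As.sum - PySem.List.pyGetD As (-1) 0
  N - pvLoopA As (PySem.List.pyRange (N - 1) (-1) (-1)) sumA

-- ===== PORT B =====
-- the comprehension's condition "2 * (sum(A) - A[-1] - sum(A[i:N-1])) < A[i]"
def pvHeavyP (As : List Int) (N : Int) (i : Int) : Bool :=
  decide (2 * (As.sum - PySem.List.pyGetD As (-1) 0
      - (PySem.List.slice As (some i) (some (N - 1))).sum) < PySem.List.pyGetD As i 0)

def possible_final_creature_colors_alt (N : Int) (A : List Int) : Int :=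
  let As := PySem.List.sorted A (fun x => x) false
  let heavy := (PySem.List.pyRange 1 N 1).filter (fun i => pvHeavyP As N i)
  N - (if heavy ≠ [] then PySem.List.pyGetD heavy (-1) 0 else 0)

-- ===== PRECONDITION & SPEC =====
-- Pre_ excludes exactly the inputs on which A raises IndexError: empty A
-- (A[-1]) and N > len(A) (the loop reads A[i] past the end).
def Pre_possible_final_creature_colors (N : Int) (A : List Int) : Prop :=
  A ≠ [] ∧ N ≤ (A.length : Int)
instance (N : Int) (A : List Int) : Decidable (Pre_possible_final_creature_colors N A) := by unfold Pre_possible_final_creature_colors; infer_instance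

def pvWitness_possible_final_creature_colors : Int × List Int := (3, [2, 7, 1])

def Spec_possible_final_creature_colors (N : Int) (A : List Int) (out : Int) : Prop := out = possible_final_creature_colors_alt N A
instance (N : Int) (A : List Int) (out : Int) : Decidable (Spec_possible_final_creature_colors N A out) := by unfold Spec_possible_final_creature_colors; infer_instance

-- ===== CLAIM (what is proved, stated in full; the proofs are below) =====
def Claim_equal_possible_final_creature_colors : Prop := ∀ (N : Int) (A : List Int), Dom_possible_final_creature_colors N A → Pre_possible_final_creature_colors N A → Spec_possible_final_creature_colors N A (possible_final_creature_colors N A)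

-- ===== LEMMAS AND PROOFS =====

-- reference value: the last index k < n with k = 0 or B's pool condition at k
def pvMemo (As : List Int) (N : Int) : Nat → Int
  | 0 => 0
  | k + 1 => if 1 ≤ (k : Int) ∧ pvHeavyP As N (k : Int) = true then (k : Int) else pvMemo As N k

-- peeling one element off the front of a slice's sum
lemma pvSlice_sum_cons (As : List Int) (a b : Nat) (hab : a < b) (hb : b ≤ As.length) :
    (PySem.List.slice As (some (a : Int)) (some (b : Int))).sum
      = As.getD a 0 + (PySem.List.slice As (some ((a + 1 : Nat) : Int)) (some (b : Int))).sum := by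
  rw [PySem.List.slice_natCast, PySem.List.slice_natCast]
  have ha : a < As.length := by omega
  rw [List.drop_eq_getElem_cons ha, show b - a = (b - (a + 1)) + 1 by omega,
      List.take_succ_cons, List.sum_cons, List.getD_eq_getElem As 0 ha]

-- B's filtered index list: its last element (default 0) is pvMemo
lemma pvHeavy_eq (As : List Int) (N : Int) (k : Nat) :
    (let heavy := (PySem.List.pyRange 1 (k : Int) 1).filter (fun i => pvHeavyP As N i);
      if heavy ≠ [] then PySem.List.pyGetD heavy (-1) 0 else 0) = pvMemo As N k := by
  induction k with
  | zero => simp [PySem.List.pyRange_one_eq_nil, pvMemo]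
  | succ j ih =>
    by_cases hj : 1 ≤ j
    · have hsplit : PySem.List.pyRange 1 ((j + 1 : Nat) : Int) 1
          = PySem.List.pyRange 1 (j : Int) 1 ++ [(j : Int)] := by
        push_cast
        exact PySem.List.pyRange_one_succ_right (by exact_mod_cast hj)
      simp only [hsplit, List.filter_append, List.filter_cons, List.filter_nil]
      by_cases hc : pvHeavyP As N (j : Int) = true
      · simp only [hc, if_true]
        rw [if_pos (by simp), PySem.List.pyGetD_neg_one_append_singleton]
        rw [pvMemo, if_pos ⟨by exact_mod_cast hj, hc⟩]
      · simp only [Bool.not_eq_true] at hc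
        simp only [hc, Bool.false_eq_true, if_false, List.append_nil]
        rw [ih, pvMemo, if_neg]
        rintro ⟨-, hc'⟩
        rw [hc] at hc'
        exact Bool.false_ne_true hc'
    · have hj0 : j = 0 := by omega
      subst hj0
      rw [show ((0 + 1 : Nat) : Int) = 1 by norm_num, PySem.List.pyRange_one_eq_nil (by norm_num)]
      simp [pvMemo]

-- A's backward loop, entered at top index k-1 with the pool of that index,
-- computes pvMemo (n is the loop's start bound N)
lemma pvLoopA_eq (As : List Int) (n : Nat) (hn : n ≤ As.length) (k : Nat)
    (h1 : 1 ≤ k) (h2 : k ≤ n) :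
    pvLoopA As (PySem.List.pyRange ((k : Int) - 1) (-1) (-1))
      (As.sum - PySem.List.pyGetD As (-1) 0
        - (PySem.List.slice As (some ((k - 1 : Nat) : Int)) (some ((n - 1 : Nat) : Int))).sum)
      = pvMemo As (n : Int) k := by
  induction k with
  | zero => omega
  | succ j ih =>
    rcases Nat.eq_or_lt_of_le h1 with h1' | hj1
    · have hj : j = 0 := by omega
      subst hj
      rw [PySem.List.pyRange_neg_one_cons (by norm_num)]
      simp [pvLoopA, pvMemo]
    · have hj : 1 ≤ j := by omega
      have hjn : j ≤ n - 1 := by omega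
      rw [show ((j + 1 : Nat) : Int) - 1 = (j : Int) by push_cast; ring,
          PySem.List.pyRange_neg_one_cons (by omega)]
      simp only [pvLoopA, Nat.add_sub_cancel]
      have hP : pvHeavyP As (n : Int) (j : Int)
          = decide (2 * (As.sum - PySem.List.pyGetD As (-1) 0
              - (PySem.List.slice As (some ((j : Nat) : Int)) (some ((n - 1 : Nat) : Int))).sum)
            < PySem.List.pyGetD As (j : Int) 0) := by
        rw [pvHeavyP, show (n : Int) - 1 = ((n - 1 : Nat) : Int) by push_cast [show 1 ≤ n by omega]; ring]
      by_cases hc : pvHeavyP As (n : Int) (j : Int) = true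
      · rw [if_pos]
        · rw [pvMemo, if_pos ⟨by exact_mod_cast hj, hc⟩]
        · left
          rw [hP, decide_eq_true_iff] at hc
          omega
      · have hcond : ¬ ((As.sum - PySem.List.pyGetD As (-1) 0
            - (PySem.List.slice As (some ((j : Nat) : Int)) (some ((n - 1 : Nat) : Int))).sum) * 2
              < PySem.List.pyGetD As (j : Int) 0 ∨ (j : Int) = 0) := by
          rw [hP] at hc
          simp only [decide_eq_true_iff] at hc
          rintro (hlt | h0)
          · exact hc (by omega)
          · omega
        rw [if_neg hcond]
        have hget' : PySem.List.pyGetD As ((j : Int) - 1) 0 = As.getD (j - 1) 0 := by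
          rw [show ((j : Int) - 1) = ((j - 1 : Nat) : Int) by push_cast [hj]; ring]
          exact PySem.List.pyGetD_natCast ..
        have hsum := pvSlice_sum_cons As (j - 1) (n - 1) (by omega) (by omega)
        rw [show j - 1 + 1 = j by omega] at hsum
        have harg : As.sum - PySem.List.pyGetD As (-1) 0
              - (PySem.List.slice As (some ((j : Nat) : Int)) (some ((n - 1 : Nat) : Int))).sum
              - PySem.List.pyGetD As ((j : Int) - 1) 0
            = As.sum - PySem.List.pyGetD As (-1) 0
              - (PySem.List.slice As (some ((j - 1 : Nat) : Int)) (some ((n - 1 : Nat) : Int))).sum := by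
          rw [hget', hsum]; ring
        rw [harg, ih hj (by omega), pvMemo, if_neg]
        rintro ⟨-, hc'⟩
        exact hc hc'

-- ===== VERDICT (by name: the statement is the Claim_ definition above) =====
theorem possible_final_creature_colors_spec : Claim_equal_possible_final_creature_colors := by
  intro N A _ hpre
  obtain ⟨hne, hNle⟩ := hpre
  have hlen : (PySem.List.sorted A (fun x => x) false).length = A.length :=
    PySem.List.length_sorted ..
  have hAsne : PySem.List.sorted A (fun x => x) false ≠ [] := by
    intro h
    rw [h] at hlen
    exact hne (List.eq_nil_of_length_eq_zero hlen.symm)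
  set As := PySem.List.sorted A (fun x => x) false with hAs
  have hlen1 : 1 ≤ As.length := List.length_pos_iff.mpr hAsne
  have hNle' : N ≤ (As.length : Int) := by rw [hlen]; exact hNle
  simp only [Spec_possible_final_creature_colors, possible_final_creature_colors,
    possible_final_creature_colors_alt, ← hAs]
  by_cases hN0 : N ≤ 0
  · -- both loops are empty: each side returns N
    rw [PySem.List.pyRange_neg_one_eq_nil (by omega), PySem.List.pyRange_one_eq_nil (show N ≤ 1 by omega)]
    simp [pvLoopA]
  · -- 1 ≤ N : write N = (n : Int) and use the two loop lemmas
    have h1 : 1 ≤ N := by omega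
    set n : Nat := N.toNat with hn
    have hNn : N = (n : Int) := by omega
    have hn1 : 1 ≤ n := by omega
    have hnlen : n ≤ As.length := by omega
    rw [hNn]
    have hA := pvLoopA_eq As n hnlen n hn1 le_rfl
    have hempty : (PySem.List.slice As (some ((n - 1 : Nat) : Int)) (some ((n - 1 : Nat) : Int))).sum = 0 := by
      rw [PySem.List.slice_natCast]
      simp
    rw [hempty, sub_zero] at hA
    rw [hA]
    have hB := pvHeavy_eq As (n : Int) n
    simp only at hB
    rw [hB]
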